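-- pv_equiv track=rewrite | github.com/SoluMilken/algo_zoo | codejam/c.py | get_increasing_subseq_2
-- ===== SOURCE A (Python) =====
-- def get_increasing_subseq_2(ants):
--     # reverse normal ants order
--     total_num = len(ants)
--     output = []
--     chosen = []
--     for i, w in enumerate(ants):
--         if i not in chosen:
--             single_output = [w]
--             for j in range(i+1, total_num):
--                 if ants[j] <= single_output[-1]:
--                     single_output.append(ants[j])
--                     chosen.append(j)
--             output.append(single_output)
--     return output
-- ===== SOURCE B (Python) =====
-- def get_increasing_subseq_2(ants):
--     n = len(ants)
--     # next-pointer: nxt[i] = smallest j > i with ants[j] <= ants[i], via monotonic stack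
--     nxt = [None] * n
--     stack = []
--     for i in range(n - 1, -1, -1):
--         while stack and ants[stack[-1]] > ants[i]:
--             stack.pop()
--         if stack:
--             nxt[i] = stack[-1]
--         stack.append(i)
--     taken = [False] * n
--     output = []
--     for i in range(n):
--         if not taken[i]:
--             chain = [ants[i]]
--             j = nxt[i]
--             while j is not None:
--                 taken[j] = True
--                 chain.append(ants[j])
--                 j = nxt[j]
--             output.append(chain)
--     return output
-- ===== Notes on version B (the rewrite author's own statement) =====
-- stated objective: faster
-- what changed: Replaces A's nested rescans of the whole suffix plus O(n) list membership tests by a monotonic-stack precomputation of next-pointers (first later index with value <= current), chains followed by pointer jumps, and a boolean taken array.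
import Mathlib
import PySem

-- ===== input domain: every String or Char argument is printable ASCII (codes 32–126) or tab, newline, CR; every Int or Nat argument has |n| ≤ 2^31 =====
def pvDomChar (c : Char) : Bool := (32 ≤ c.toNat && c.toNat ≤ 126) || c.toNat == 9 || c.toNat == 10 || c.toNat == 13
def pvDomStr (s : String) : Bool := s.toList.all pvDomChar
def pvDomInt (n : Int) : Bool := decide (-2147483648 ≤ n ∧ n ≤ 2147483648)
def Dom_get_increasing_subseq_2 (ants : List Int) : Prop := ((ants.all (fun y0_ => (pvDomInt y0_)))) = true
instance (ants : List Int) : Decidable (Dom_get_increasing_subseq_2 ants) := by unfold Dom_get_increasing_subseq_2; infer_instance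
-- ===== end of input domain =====

-- B replaces A's quadratic nested rescans (and O(n) list-membership tests) by monotonic-stack
-- next-pointers, pointer-jump chains and a boolean taken array; same return value, measurably faster.

-- B replaces A's quadratic nested suffix rescans (and O(n) list-membership tests) with
-- monotonic-stack next-pointers, pointer-jump chains and a boolean taken array; same return value.

-- ===== PORT A =====
-- all list indexing in both Pythons is in range, so `getD _ 0` is exact
def pvGetI (a : List Int) (j : Nat) : Int := a.getD j 0

-- A's inner for-loop over j in range(i+1, total_num); `so` (single_output) is always
-- nonempty, so `getLastD 0` is Python's single_output[-1]
def pvInnerA (a : List Int) (n p : Nat) (so : List Int) (ch : List Nat) : List Int × List Nat :=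
  if _h : p < n then
    if pvGetI a p ≤ so.getLastD 0 then
      pvInnerA a n (p+1) (so ++ [pvGetI a p]) (ch ++ [p])
    else pvInnerA a n (p+1) so ch
  else (so, ch)
termination_by n - p

-- A's outer for-loop over i (enumerate only uses the index; w = ants[i])
def pvOuterA (a : List Int) (n i : Nat) (out : List (List Int)) (ch : List Nat) : List (List Int) :=
  if _h : i < n then
    if i ∉ ch then
      let r := pvInnerA a n (i+1) [pvGetI a i] ch
      pvOuterA a n (i+1) (out ++ [r.1]) r.2
    else pvOuterA a n (i+1) out ch
  else out
termination_by n - i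

def get_increasing_subseq_2 (ants : List Int) : List (List Int) :=
  pvOuterA ants ants.length 0 [] []

-- ===== PORT B =====
-- Source B's `while stack and ants[stack[-1]] > ants[i]: stack.pop()`; the Python stack's
-- top (end of the list) is the head of the Lean list
def pvPop (a : List Int) (w : Int) : List Nat → List Nat
  | [] => []
  | t :: rest => if pvGetI a t > w then pvPop a w rest else t :: rest

-- Source B's descending loop `for i in range(n-1, -1, -1)`: argument m+1 processes index m
def pvBuildNxt (a : List Int) : Nat → List (Option Nat) → List Nat → List (Option Nat) × List Nat
  | 0, nxt, stack => (nxt, stack)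
  | m+1, nxt, stack =>
    let s' := pvPop a (pvGetI a m) stack
    let nxt' := match s' with
      | [] => nxt
      | t :: _ => nxt.set m (some t)
    pvBuildNxt a m nxt' (m :: s')

-- Source B's `while j is not None` chain walk; fuel bounds the iteration count
-- (never exhausted on the calls made: nxt is strictly increasing)
def pvFollow (a : List Int) (nxt : List (Option Nat)) :
    Nat → Option Nat → List Int → List Bool → List Int × List Bool
  | _, none, chain, taken => (chain, taken)
  | 0, some _, chain, taken => (chain, taken)
  | f+1, some j, chain, taken =>
    pvFollow a nxt f (nxt.getD j none) (chain ++ [pvGetI a j]) (taken.set j true)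

-- Source B's output loop over i with the boolean `taken` array
def pvOuterB (a : List Int) (nxt : List (Option Nat)) (n i : Nat)
    (out : List (List Int)) (taken : List Bool) : List (List Int) :=
  if _h : i < n then
    if taken.getD i false then pvOuterB a nxt n (i+1) out taken
    else
      let r := pvFollow a nxt n (nxt.getD i none) [pvGetI a i] taken
      pvOuterB a nxt n (i+1) (out ++ [r.1]) r.2
  else out
termination_by n - i

def get_increasing_subseq_2_alt (ants : List Int) : List (List Int) :=
  let n := ants.length
  let r := pvBuildNxt ants n (List.replicate n none) []
  pvOuterB ants r.1 n 0 [] (List.replicate n false)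

-- ===== PRECONDITION & SPEC =====
def Spec_get_increasing_subseq_2 (ants : List Int) (out : List (List Int)) : Prop := out = get_increasing_subseq_2_alt ants
instance (ants : List Int) (out : List (List Int)) : Decidable (Spec_get_increasing_subseq_2 ants out) := by unfold Spec_get_increasing_subseq_2; infer_instance

-- ===== CLAIM (what is proved, stated in full; the proofs are below) =====
def Claim_equal_get_increasing_subseq_2 : Prop := ∀ (ants : List Int), Dom_get_increasing_subseq_2 ants → Spec_get_increasing_subseq_2 ants (get_increasing_subseq_2 ants)

-- ===== LEMMAS AND PROOFS =====

def nextIdx (a : List Int) (v : Int) (p : Nat) : Option Nat :=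
  if _h : p < a.length then
    if pvGetI a p ≤ v then some p else nextIdx a v (p+1)
  else none
termination_by a.length - p

theorem nextIdx_some {a : List Int} {v : Int} {p j : Nat} (h : nextIdx a v p = some j) :
    p ≤ j ∧ j < a.length ∧ pvGetI a j ≤ v ∧ ∀ k, p ≤ k → k < j → v < pvGetI a k := by
  fun_induction nextIdx a v p with
  | case1 p hp hle => simp_all
  | case2 p hp hle ih =>
    obtain ⟨h1, h2, h3, h4⟩ := ih h
    refine ⟨by omega, h2, h3, fun k hk1 hk2 => ?_⟩
    rcases Nat.eq_or_lt_of_le hk1 with rfl | hk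
    · omega
    · exact h4 k hk hk2
  | case3 p hp => simp at h

theorem nextIdx_skip {a : List Int} {v : Int} {p q : Nat} (hpq : p ≤ q)
    (hfail : ∀ k, p ≤ k → k < q → v < pvGetI a k) :
    nextIdx a v p = nextIdx a v q := by
  obtain ⟨d, rfl⟩ : ∃ d, q = p + d := ⟨q - p, by omega⟩
  clear hpq
  induction d generalizing p with
  | zero => rfl
  | succ d ih =>
    have hv : v < pvGetI a p := hfail p (le_refl p) (by omega)
    have h1 : nextIdx a v p = nextIdx a v (p+1) := by
      rw [nextIdx]; split
      · rw [if_neg (by omega)]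
      · rw [nextIdx]; split <;> [skip; rfl]
        omega
    rw [h1]
    have := ih (p := p+1) (fun k hk1 hk2 => hfail k (by omega) (by omega))
    rw [this]; congr 1; omega

theorem nextIdx_none {a : List Int} {v : Int} {p : Nat} (h : nextIdx a v p = none) :
    ∀ k, p ≤ k → k < a.length → v < pvGetI a k := by
  fun_induction nextIdx a v p with
  | case1 p hp hle => simp at h
  | case2 p hp hle ih =>
    intro k hk1 hk2
    rcases Nat.eq_or_lt_of_le hk1 with rfl | hk
    · omega
    · exact ih h k hk hk2
  | case3 p hp => intro k hk1 hk2; omega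

theorem nextIdx_ge {a : List Int} {v : Int} {p : Nat} (h : a.length ≤ p) :
    nextIdx a v p = none := by
  rw [nextIdx]; rw [dif_neg (by omega)]

theorem nextIdx_jump {a : List Int} {v : Int} {c : Nat} (hv : v < pvGetI a c) :
    nextIdx a v (c+1) = match nextIdx a (pvGetI a c) (c+1) with
      | none => none
      | some j => nextIdx a v j := by
  cases h : nextIdx a (pvGetI a c) (c+1) with
  | none =>
    by_cases hc : c + 1 ≤ a.length
    · rw [nextIdx_skip (q := a.length) hc
        (fun k hk1 hk2 => by have := nextIdx_none h k hk1 hk2; omega)]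
      exact nextIdx_ge (le_refl _)
    · exact nextIdx_ge (by omega)
  | some j =>
    obtain ⟨h1, h2, h3, h4⟩ := nextIdx_some h
    exact nextIdx_skip h1 (fun k hk1 hk2 => by have := h4 k hk1 hk2; omega)

def chainT (a : List Int) (c : Nat) : List Nat :=
  match h : nextIdx a (pvGetI a c) (c+1) with
  | none => []
  | some j => j :: chainT a j
termination_by a.length - c
decreasing_by have := nextIdx_some h; omega

theorem chainT_mem {a : List Int} {c : Nat} : ∀ j ∈ chainT a c, c < j ∧ j < a.length := by
  fun_induction chainT a c with
  | case1 c _ => simp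
  | case2 c j h ih =>
    intro k hk
    obtain ⟨h1, h2, h3, h4⟩ := nextIdx_some h
    rcases List.mem_cons.1 hk with rfl | hk'
    · omega
    · have := ih k hk'; omega


theorem innerA_skip {a : List Int} {p q : Nat} (so : List Int) (ch : List Nat)
    (hpq : p ≤ q) (hqn : q ≤ a.length)
    (hfail : ∀ k, p ≤ k → k < q → so.getLastD 0 < pvGetI a k) :
    pvInnerA a a.length p so ch = pvInnerA a a.length q so ch := by
  obtain ⟨d, rfl⟩ : ∃ d, q = p + d := ⟨q - p, by omega⟩
  clear hpq
  induction d generalizing p with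
  | zero => rfl
  | succ d ih =>
    have h1 : pvInnerA a a.length p so ch = pvInnerA a a.length (p+1) so ch := by
      rw [pvInnerA, dif_pos (by omega), if_neg (by have := hfail p (le_refl p) (by omega); omega)]
    rw [h1, ih (by omega) (fun k hk1 hk2 => hfail k (by omega) (by omega))]
    congr 1; omega

theorem getLastD_snoc (l : List Int) (x : Int) : (l ++ [x]).getLastD 0 = x := by
  simp [List.getLastD_eq_getLast?, List.getLast?_append]

theorem innerA_eq {a : List Int} (c : Nat) :
    ∀ (so : List Int) (ch : List Nat), so.getLastD 0 = pvGetI a c →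
    pvInnerA a a.length (c+1) so ch
      = (so ++ (chainT a c).map (fun j => pvGetI a j), ch ++ chainT a c) := by
  fun_induction chainT a c with
  | case1 c h =>
    intro so ch hlast
    by_cases hc : c + 1 ≤ a.length
    · rw [innerA_skip so ch hc (le_refl _)
        (fun k hk1 hk2 => by rw [hlast]; exact nextIdx_none h k hk1 hk2)]
      rw [pvInnerA, dif_neg (by omega)]; simp
    · rw [pvInnerA, dif_neg (by omega)]; simp
  | case2 c j h ih =>
    intro so ch hlast
    obtain ⟨h1, h2, h3, h4⟩ := nextIdx_some h
    rw [innerA_skip so ch h1 (by omega)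
      (fun k hk1 hk2 => by rw [hlast]; exact h4 k hk1 hk2)]
    rw [pvInnerA, dif_pos h2, if_pos (by rw [hlast]; exact h3)]
    rw [ih (so ++ [pvGetI a j]) (ch ++ [j]) (getLastD_snoc _ _)]
    simp


theorem chainT_eq (a : List Int) (c : Nat) :
    chainT a c = match nextIdx a (pvGetI a c) (c+1) with
      | none => []
      | some j => j :: chainT a j := by
  rw [chainT]
  cases hx : nextIdx a (pvGetI a c) (c+1) <;> simp

theorem pop_chain {a : List Int} (v : Int) :
    ∀ (k c : Nat), a.length - c ≤ k → c < a.length →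
    pvPop a v (c :: chainT a c) = (match nextIdx a v c with
      | none => []
      | some j => j :: chainT a j) := by
  intro k
  induction k with
  | zero => intro c hk hc; omega
  | succ k ih =>
    intro c hk hc
    by_cases hle : pvGetI a c ≤ v
    · rw [show nextIdx a v c = some c from by rw [nextIdx, dif_pos hc, if_pos hle]]
      simp only [pvPop, if_neg (by omega : ¬ pvGetI a c > v)]
    · have hv : v < pvGetI a c := by omega
      have hstep : nextIdx a v c = nextIdx a v (c+1) := by
        rw [nextIdx, dif_pos hc, if_neg hle]
      simp only [pvPop, if_pos (by omega : pvGetI a c > v)]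
      rw [hstep, nextIdx_jump hv]
      cases h : nextIdx a (pvGetI a c) (c+1) with
      | none => rw [chainT_eq, h]; rfl
      | some j =>
        obtain ⟨h1, h2, h3, h4⟩ := nextIdx_some h
        rw [chainT_eq, h]
        exact ih j (by omega) h2


theorem getD_set_self' {α : Type} {l : List α} {d : α} {i : Nat} (h : i < l.length) (x : α) :
    (l.set i x).getD i d = x := by
  simp [List.getD_eq_getElem?_getD, h]

theorem getD_set_ne' {α : Type} {l : List α} {d : α} {i j : Nat} (h : i ≠ j) (x : α) :
    (l.set i x).getD j d = l.getD j d := by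
  simp [List.getD_eq_getElem?_getD, h]

theorem buildNxt_inv (a : List Int) :
    ∀ (m : Nat) (nxt : List (Option Nat)) (stack : List Nat),
    m ≤ a.length → nxt.length = a.length →
    (∀ j, j < m → nxt.getD j none = none) →
    (∀ j, m ≤ j → j < a.length → nxt.getD j none = nextIdx a (pvGetI a j) (j+1)) →
    stack = (if m < a.length then m :: chainT a m else []) →
    ∀ j, j < a.length →
      (pvBuildNxt a m nxt stack).1.getD j none = nextIdx a (pvGetI a j) (j+1) := by
  intro m
  induction m with
  | zero =>
    intro nxt stack _ _ _ h4 _ j hj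
    exact h4 j (Nat.zero_le _) hj
  | succ m ih =>
    intro nxt stack hm hlen h3 h4 hstack j hj
    by_cases hm1 : m + 1 < a.length
    · rw [if_pos hm1] at hstack
      subst hstack
      simp only [pvBuildNxt]
      rw [pop_chain (pvGetI a m) (a.length - (m+1)) (m+1) (le_refl _) hm1]
      cases h : nextIdx a (pvGetI a m) (m+1) with
      | none =>
        refine ih nxt _ (by omega) hlen (fun j' hj' => h3 j' (by omega)) ?_ ?_ j hj
        · intro j' hj1 hj2
          rcases Nat.eq_or_lt_of_le hj1 with rfl | hlt
          · rw [h3 _ (by omega), h]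
          · exact h4 j' (by omega) hj2
        · rw [if_pos (by omega), chainT_eq, h]
      | some t =>
        obtain ⟨ht1, ht2, _, _⟩ := nextIdx_some h
        refine ih (nxt.set m (some t)) _ (by omega) (by simp [hlen]) ?_ ?_ ?_ j hj
        · intro j' hj'
          rw [getD_set_ne' (by omega), h3 j' (by omega)]
        · intro j' hj1 hj2
          rcases Nat.eq_or_lt_of_le hj1 with rfl | hlt
          · rw [getD_set_self' (by omega), h]
          · rw [getD_set_ne' (by omega), h4 j' (by omega) hj2]
        · rw [if_pos (by omega), chainT_eq, h]
    · have hml : m + 1 = a.length := by omega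
      rw [if_neg hm1] at hstack
      subst hstack
      simp only [pvBuildNxt, pvPop]
      refine ih nxt _ (by omega) hlen (fun j' hj' => h3 j' (by omega)) ?_ ?_ j hj
      · intro j' hj1 hj2
        have : j' = m := by omega
        subst this
        rw [h3 _ (by omega), nextIdx_ge (by omega)]
      · rw [if_pos (by omega), chainT_eq, nextIdx_ge (by omega)]


theorem follow_eq {a : List Int} {nxt : List (Option Nat)}
    (hn : ∀ j, j < a.length → nxt.getD j none = nextIdx a (pvGetI a j) (j+1)) :
    ∀ (fuel c : Nat), c < a.length → a.length - c ≤ fuel →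
    ∀ (chain : List Int) (taken : List Bool),
    pvFollow a nxt fuel (nxt.getD c none) chain taken
      = (chain ++ (chainT a c).map (fun j => pvGetI a j),
         (chainT a c).foldl (fun t j => t.set j true) taken) := by
  intro fuel
  induction fuel with
  | zero => intro c hc hk; omega
  | succ f ih =>
    intro c hc hk chain taken
    rw [hn c hc]
    cases h : nextIdx a (pvGetI a c) (c+1) with
    | none => rw [chainT_eq, h]; simp [pvFollow]
    | some j =>
      obtain ⟨h1, h2, _, _⟩ := nextIdx_some h
      rw [chainT_eq, h]
      simp only [pvFollow]
      rw [ih j h2 (by omega)]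
      simp



theorem foldl_set_length : ∀ (l : List Nat) (t : List Bool),
    (l.foldl (fun t j => t.set j true) t).length = t.length := by
  intro l
  induction l with
  | nil => intro t; rfl
  | cons x xs ih => intro t; rw [List.foldl_cons, ih, List.length_set]

theorem foldl_set_getD : ∀ (l : List Nat) (t : List Bool) (j : Nat),
    (∀ x ∈ l, x < t.length) →
    ((l.foldl (fun t j => t.set j true) t).getD j false = true ↔
      j ∈ l ∨ t.getD j false = true) := by
  intro l
  induction l with
  | nil => intro t j _; simp
  | cons x xs ih =>
    intro t j hb
    rw [List.foldl_cons, ih _ j (fun y hy => by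
      rw [List.length_set]; exact hb y (List.mem_cons_of_mem _ hy))]
    by_cases hx : j = x
    · subst hx
      rw [getD_set_self' (hb j (List.mem_cons_self)) true]
      simp
    · rw [getD_set_ne' (fun hc => hx hc.symm) true]
      simp [hx]

theorem outer_eq {a : List Int} {nxt : List (Option Nat)}
    (hn : ∀ j, j < a.length → nxt.getD j none = nextIdx a (pvGetI a j) (j+1)) :
    ∀ (k i : Nat) (out : List (List Int)) (ch : List Nat) (taken : List Bool),
    a.length - i ≤ k →
    taken.length = a.length →
    (∀ j, j ∈ ch → j < a.length) →
    (∀ j, j ∈ ch ↔ taken.getD j false = true) →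
    pvOuterA a a.length i out ch = pvOuterB a nxt a.length i out taken := by
  intro k
  induction k with
  | zero =>
    intro i out ch taken hk _ _ _
    rw [pvOuterA, dif_neg (by omega), pvOuterB, dif_neg (by omega)]
  | succ k ih =>
    intro i out ch taken hk hlen hb hiff
    by_cases hi : i < a.length
    · by_cases hmem : i ∈ ch
      · rw [pvOuterA, dif_pos hi, if_neg (by simpa using hmem),
            pvOuterB, dif_pos hi, if_pos ((hiff i).1 hmem)]
        exact ih (i+1) out ch taken (by omega) hlen hb hiff
      · have htk : taken.getD i false = false := by
          cases hv : taken.getD i false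
          · rfl
          · exact absurd ((hiff i).2 hv) hmem
        rw [pvOuterA, dif_pos hi, if_pos hmem, pvOuterB, dif_pos hi, htk]
        simp only [Bool.false_eq_true, if_false]
        rw [innerA_eq i [pvGetI a i] ch (by simp)]
        rw [follow_eq hn a.length i hi (by omega)]
        refine ih (i+1) _ _ _ (by omega) ?_ ?_ ?_
        · rw [foldl_set_length, hlen]
        · intro j hj
          rcases List.mem_append.1 hj with hj' | hj'
          · exact hb j hj'
          · exact (chainT_mem j hj').2
        · intro j
          rw [foldl_set_getD _ _ _ (fun y hy => by rw [hlen]; exact (chainT_mem y hy).2)]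
          rw [List.mem_append]
          rw [← hiff j]
          tauto
    · rw [pvOuterA, dif_neg hi, pvOuterB, dif_neg hi]



theorem getD_replicate_none (n j : Nat) :
    (List.replicate n (none : Option Nat)).getD j none = none := by
  simp [List.getD_eq_getElem?_getD, List.getElem?_replicate]
  split <;> rfl

-- ===== VERDICT (by name: the statement is the Claim_ definition above) =====
theorem get_increasing_subseq_2_spec : Claim_equal_get_increasing_subseq_2 := by
  intro ants _
  unfold Spec_get_increasing_subseq_2
  unfold get_increasing_subseq_2 get_increasing_subseq_2_alt
  have hn : ∀ j, j < ants.length →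
      (pvBuildNxt ants ants.length (List.replicate ants.length none) []).1.getD j none
        = nextIdx ants (pvGetI ants j) (j+1) := by
    refine buildNxt_inv ants ants.length _ _ (le_refl _) (by simp)
      (fun j _ => getD_replicate_none _ _) (fun j h1 h2 => by omega) ?_
    rw [if_neg (lt_irrefl _)]
  exact outer_eq hn ants.length 0 [] [] (List.replicate ants.length false)
    (by omega) (by simp) (by simp) (fun j => by simp)
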